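-- pv_equiv track=rewrite | github.com/amiralikaboli/ML-Course | regression/regularization_polynomial.py | calc_powers_from_permutation
-- ===== SOURCE A (Python) =====
-- def calc_powers_from_permutation(permutation):
--     powers = []
--     last_pow = 0
--     for cordinate in permutation:
--         if cordinate == 0:
--             last_pow += 1
--         else:
--             powers.append(last_pow)
--             last_pow = 0
--     powers.append(last_pow)
--
--     return powers
-- ===== SOURCE B (Python) =====
-- def calc_powers_from_permutation(permutation):
--     seps = [i for i, c in enumerate(permutation) if c != 0]
--     bounds = [-1] + seps + [len(permutation)]
--     return [b - a - 1 for a, b in zip(bounds, bounds[1:])]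
-- ===== Notes on version B (the rewrite author's own statement) =====
-- stated objective: alternative
-- what changed: Replaces the running-counter fold over elements by an index-based decomposition: collect the indices of non-zero separators, add -1/len sentinels, and emit each gap as the difference of consecutive bounds.
import Mathlib
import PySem

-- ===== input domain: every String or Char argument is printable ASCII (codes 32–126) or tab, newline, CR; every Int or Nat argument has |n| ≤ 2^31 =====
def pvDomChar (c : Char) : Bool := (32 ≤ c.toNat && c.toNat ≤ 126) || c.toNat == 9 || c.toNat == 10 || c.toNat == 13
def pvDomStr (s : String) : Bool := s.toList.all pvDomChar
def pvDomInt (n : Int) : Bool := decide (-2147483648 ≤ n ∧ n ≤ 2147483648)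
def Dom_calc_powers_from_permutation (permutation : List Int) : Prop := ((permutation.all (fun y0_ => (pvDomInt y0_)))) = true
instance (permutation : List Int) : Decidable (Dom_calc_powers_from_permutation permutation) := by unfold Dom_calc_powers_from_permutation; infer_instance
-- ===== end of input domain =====

-- B replaces A's running-counter fold by a separator-index/sentinel gap decomposition (objective: alternative).


-- ===== PORT A =====
-- A: fold over the elements carrying (powers, last_pow); emit last_pow at each non-zero, append it at the end.
def calc_powers_from_permutation (permutation : List Int) : List Int :=
  let s := permutation.foldl
    (fun (st : List Int × Int) cordinate =>
      if cordinate = 0 then (st.1, st.2 + 1) else (st.1 ++ [st.2], 0))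
    ([], 0)
  s.1 ++ [s.2]

-- ===== PORT B =====
-- '[i for i, c in enumerate(permutation) if c != 0]': index-counting comprehension, counter k starts at 0.
def sepIdxs (k : Int) : List Int → List Int
  | [] => []
  | c :: t => if c ≠ 0 then k :: sepIdxs (k + 1) t else sepIdxs (k + 1) t

def calc_powers_from_permutation_alt (permutation : List Int) : List Int :=
  let seps := sepIdxs 0 permutation
  let bounds := (-1 : Int) :: (seps ++ [(permutation.length : Int)])
  (bounds.zip bounds.tail).map (fun p => p.2 - p.1 - 1)

-- ===== PRECONDITION & SPEC =====
def Spec_calc_powers_from_permutation (permutation : List Int) (out : List Int) : Prop := out = calc_powers_from_permutation_alt permutation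
instance (permutation : List Int) (out : List Int) : Decidable (Spec_calc_powers_from_permutation permutation out) := by unfold Spec_calc_powers_from_permutation; infer_instance

-- ===== CLAIM (what is proved, stated in full; the proofs are below) =====
def Claim_equal_calc_powers_from_permutation : Prop := ∀ (permutation : List Int), Dom_calc_powers_from_permutation permutation → Spec_calc_powers_from_permutation permutation (calc_powers_from_permutation permutation)

-- ===== LEMMAS AND PROOFS =====

-- gap list between consecutive bounds a, s…, n
def gapsOf (a : Int) : List Int → Int → List Int
  | [], n => [n - a - 1]
  | b :: rest, n => (b - a - 1) :: gapsOf b rest n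

theorem zip_map_eq_gapsOf (s : List Int) (a n : Int) :
    (((a :: (s ++ [n])).zip ((a :: (s ++ [n])).tail)).map (fun p => p.2 - p.1 - 1))
      = gapsOf a s n := by
  induction s generalizing a with
  | nil => simp [gapsOf]
  | cons b rest ih =>
      simpa [gapsOf, List.zip] using ih b

theorem foldl_eq_gapsOf (t : List Int) :
    ∀ (ps : List Int) (last k : Int),
      (t.foldl (fun (st : List Int × Int) c =>
          if c = 0 then (st.1, st.2 + 1) else (st.1 ++ [st.2], 0)) (ps, last)).1
        ++ [(t.foldl (fun (st : List Int × Int) c =>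
          if c = 0 then (st.1, st.2 + 1) else (st.1 ++ [st.2], 0)) (ps, last)).2]
      = ps ++ gapsOf (k - 1 - last) (sepIdxs k t) (k + (t.length : Int)) := by
  induction t with
  | nil =>
      intro ps last k
      simp only [List.foldl_nil, List.length_nil, sepIdxs, gapsOf]
      congr 1
      congr 1
      omega
  | cons c t ih =>
      intro ps last k
      by_cases hc : c = 0
      · simp only [List.foldl_cons, hc, if_pos, sepIdxs, ne_eq, not_true_eq_false,
          if_false, ite_true, List.length_cons]
        rw [ih ps (last + 1) (k + 1)]
        have h1 : k + 1 - 1 - (last + 1) = k - 1 - last := by ring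
        have h2 : k + 1 + (t.length : Int) = k + ((t.length : Int) + 1) := by ring
        rw [h1, h2]
        congr 2
      · simp only [List.foldl_cons, hc, sepIdxs, ne_eq, not_false_eq_true,
          ite_true, ite_false, List.length_cons]
        rw [ih (ps ++ [last]) 0 (k + 1)]
        have h1 : k - (k - 1 - last) - 1 = last := by ring
        rw [List.append_assoc]
        have h2 : k + 1 - 1 - 0 = k := by ring
        rw [h2]
        simp only [gapsOf, h1, List.singleton_append]
        congr 3
        all_goals omega

-- ===== VERDICT (by name: the statement is the Claim_ definition above) =====
theorem calc_powers_from_permutation_spec : Claim_equal_calc_powers_from_permutation := by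
  intro permutation _
  unfold Spec_calc_powers_from_permutation calc_powers_from_permutation calc_powers_from_permutation_alt
  rw [zip_map_eq_gapsOf]
  have := foldl_eq_gapsOf permutation [] 0 0
  simpa using this
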